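-- pv_equiv track=rewrite | github.com/imathur1/google-foobar | Level_3/Lvl_3_Part_2.py | no
-- ===== SOURCE A (Python) =====
-- def no(start, length):
--     output = 0
--     alt = length
--
--     while length > 0:
--
--         value = length
--         new = start
--
--         # Even Even
--         if new % 2 == 0 and (new + value - 1) % 2 == 0:
--             output ^= (new + value - 1)
--             value -= 1
--             if (value - 2) % 4 == 0 or (value - 2) == 0:
--                 output ^= 1
--
--         # Even Odd
--         elif new % 2 == 0 and (new + value - 1) % 2 != 0:
--             if (value - 2) % 4 == 0 or (value - 2) == 0:
--                 output ^= 1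
--
--         # Odd Even
--         elif new % 2 != 0 and (new + value - 1) % 2 == 0:
--             output ^= new
--             output ^= (new + value - 1)
--             new += 1
--             value -= 2
--             if (value - 2) % 4 == 0 or (value - 2) == 0:
--                 output ^= 1
--
--         # Odd Odd
--         else:
--             output ^= new
--             new += 1
--             value -= 1
--             if (value - 2) % 4 == 0:
--                 output ^= 1
--
--         start += alt
--         length -= 1
--
--     return output
-- ===== SOURCE B (Python) =====
-- def no(start, length):
--     # XOR checksum of the triangular region: row i (0-based) starts at
--     # start + i*length and has width length - i.  Each row's XOR is taken
--     # with the closed-form prefix formula xor(0..n) = (n, 1, n+1, 0)[n % 4].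
--     def xor_upto(n):
--         return (n, 1, n + 1, 0)[n % 4]
--     output = 0
--     for i in range(length):
--         s = start + i * length
--         w = length - i
--         output ^= xor_upto(s + w - 1) ^ xor_upto(s - 1)
--     return output
-- ===== Notes on version B (the rewrite author's own statement) =====
-- stated objective: simpler
-- what changed: Replaces A's four-way even/odd branch casework per row (with in-branch endpoint xors and a mod-4 parity patch) by the standard closed-form XOR-prefix table xor_upto(n) = (n, 1, n+1, 0)[n % 4], XOR-ing xor_upto(s+w-1) ^ xor_upto(s-1) per row over a plain for-range loop.
import Mathlib
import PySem

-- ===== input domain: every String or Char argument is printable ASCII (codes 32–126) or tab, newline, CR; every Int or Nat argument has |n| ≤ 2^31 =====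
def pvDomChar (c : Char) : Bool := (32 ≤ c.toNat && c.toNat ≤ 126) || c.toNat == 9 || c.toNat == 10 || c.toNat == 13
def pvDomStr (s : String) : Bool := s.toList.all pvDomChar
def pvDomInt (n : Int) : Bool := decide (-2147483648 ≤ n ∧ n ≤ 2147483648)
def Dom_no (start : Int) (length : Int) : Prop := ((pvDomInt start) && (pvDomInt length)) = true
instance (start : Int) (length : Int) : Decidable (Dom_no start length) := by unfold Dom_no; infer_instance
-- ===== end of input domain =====

-- B replaces A's four-way even/odd row casework by the closed-form XOR-prefix table
-- xor_upto(n) = (n, 1, n+1, 0)[n % 4]; same O(length) loop, simpler per-row computation.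

-- ===== PORT A =====
-- one iteration of A's while-loop body up to 'start += alt; length -= 1'
-- (Python's 'new += 1' updates in branches 3/4 are dropped: 'new' is not read afterwards)
def rowStep (output : Int) (new : Int) (value : Int) : Int :=
  if PySem.Int.mod new 2 = 0 ∧ PySem.Int.mod (new + value - 1) 2 = 0 then
    -- Even Even
    let output := PySem.Int.bxor output (new + value - 1)
    let value := value - 1
    if PySem.Int.mod (value - 2) 4 = 0 ∨ value - 2 = 0 then PySem.Int.bxor output 1 else output
  else if PySem.Int.mod new 2 = 0 ∧ ¬ PySem.Int.mod (new + value - 1) 2 = 0 then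
    -- Even Odd
    if PySem.Int.mod (value - 2) 4 = 0 ∨ value - 2 = 0 then PySem.Int.bxor output 1 else output
  else if ¬ PySem.Int.mod new 2 = 0 ∧ PySem.Int.mod (new + value - 1) 2 = 0 then
    -- Odd Even
    let output := PySem.Int.bxor (PySem.Int.bxor output new) (new + value - 1)
    let value := value - 2
    if PySem.Int.mod (value - 2) 4 = 0 ∨ value - 2 = 0 then PySem.Int.bxor output 1 else output
  else
    -- Odd Odd
    let output := PySem.Int.bxor output new
    let value := value - 1
    if PySem.Int.mod (value - 2) 4 = 0 then PySem.Int.bxor output 1 else output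

-- A's while-loop: value := length, new := start at each iteration's top
def noLoop (alt : Int) (output : Int) (start : Int) (length : Int) : Int :=
  if h : 0 < length then
    noLoop alt (rowStep output start length) (start + alt) (length - 1)
  else output
termination_by length.toNat
decreasing_by omega

def no (start : Int) (length : Int) : Int :=
  noLoop length 0 start length

-- ===== PORT B =====
-- xor_upto(n) = (n, 1, n + 1, 0)[n % 4]  (XOR of 0..n, extended to all ints by the same table)
def xorUpto (n : Int) : Int :=
  let r := PySem.Int.mod n 4
  if r = 0 then n else if r = 1 then 1 else if r = 2 then n + 1 else 0

def no_alt (start : Int) (length : Int) : Int :=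
  (PySem.List.pyRange 0 length 1).foldl
    (fun output i =>
      PySem.Int.bxor output
        (PySem.Int.bxor (xorUpto (start + i * length + (length - i) - 1))
          (xorUpto (start + i * length - 1)))) 0

-- ===== PRECONDITION & SPEC =====
def Spec_no (start : Int) (length : Int) (out : Int) : Prop := out = no_alt start length
instance (start : Int) (length : Int) (out : Int) : Decidable (Spec_no start length out) := by unfold Spec_no; infer_instance

-- ===== CLAIM (what is proved, stated in full; the proofs are below) =====
def Claim_equal_no : Prop := ∀ (start : Int) (length : Int), Dom_no start length → Spec_no start length (no start length)

-- ===== LEMMAS AND PROOFS =====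

lemma pvNotOne (n : Nat) : ¬ (1 ≤ -(n : Int)) := by omega

lemma pvBxorAssoc (a b c : Int) :
    PySem.Int.bxor (PySem.Int.bxor a b) c = PySem.Int.bxor a (PySem.Int.bxor b c) := by
  unfold PySem.Int.bxor
  by_cases ha : 0 ≤ a <;> by_cases hb : 0 ≤ b <;> by_cases hc : 0 ≤ c <;>
    simp [ha, hb, hc, Nat.xor_assoc] <;>
    first
      | (intro hI; exact absurd hI (pvNotOne _))
      | (rw [if_neg (pvNotOne _), if_neg (pvNotOne _)])

lemma pvBxorLeftComm (a b c : Int) :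
    PySem.Int.bxor a (PySem.Int.bxor b c) = PySem.Int.bxor b (PySem.Int.bxor a c) := by
  rw [← pvBxorAssoc, PySem.Int.bxor_comm a b, pvBxorAssoc]

lemma pvBxorOneEven (a : Int) (h : a % 2 = 0) : PySem.Int.bxor a 1 = a + 1 := by
  unfold PySem.Int.bxor
  by_cases ha : 0 ≤ a
  · rw [if_pos ha, if_pos (by norm_num : (0:Int) ≤ 1)]
    have hx := Nat.xor_one_of_even (Nat.even_iff.mpr (by omega : a.toNat % 2 = 0))
    rw [Int.toNat_one, hx]
    omega
  · rw [if_neg ha, if_pos (by norm_num : (0:Int) ≤ 1)]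
    have hx := Nat.xor_one_of_odd (Nat.odd_iff.mpr (by omega : (-a - 1).toNat % 2 = 1))
    rw [Int.toNat_one, hx]
    omega

lemma pvBxorOneOdd (a : Int) (h : a % 2 = 1) : PySem.Int.bxor a 1 = a - 1 := by
  unfold PySem.Int.bxor
  by_cases ha : 0 ≤ a
  · rw [if_pos ha, if_pos (by norm_num : (0:Int) ≤ 1)]
    have hx := Nat.xor_one_of_odd (Nat.odd_iff.mpr (by omega : a.toNat % 2 = 1))
    rw [Int.toNat_one, hx]
    omega
  · rw [if_neg ha, if_pos (by norm_num : (0:Int) ≤ 1)]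
    have hx := Nat.xor_one_of_even (Nat.even_iff.mpr (by omega : (-a - 1).toNat % 2 = 0))
    rw [Int.toNat_one, hx]
    omega

lemma row_eq (output s w : Int) (hw : 0 < w) :
    rowStep output s w =
      PySem.Int.bxor output
        (PySem.Int.bxor (xorUpto (s + w - 1)) (xorUpto (s - 1))) := by
  have h2 : ∀ x : Int, PySem.Int.mod x 2 = x % 2 :=
    fun x => PySem.Int.mod_eq_emod_of_pos (by norm_num)
  have h4 : ∀ x : Int, PySem.Int.mod x 4 = x % 4 :=
    fun x => PySem.Int.mod_eq_emod_of_pos (by norm_num)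
  have es : s - 1 + 1 = s := by ring
  simp only [rowStep, xorUpto, h2, h4]
  rcases (by omega : s % 4 = 0 ∨ s % 4 = 1 ∨ s % 4 = 2 ∨ s % 4 = 3) with hs | hs | hs | hs
  · rcases (by omega : w % 4 = 0 ∨ w % 4 = 1 ∨ w % 4 = 2 ∨ w % 4 = 3) with hv | hv | hv | hv
    · -- s%4=0, w%4=0: branch Even Odd, no flip; RHS: T(L)=0, T(s-1)=0
      rw [if_neg (by omega : ¬(s % 2 = 0 ∧ (s + w - 1) % 2 = 0)),
          if_pos (by omega : s % 2 = 0 ∧ ¬(s + w - 1) % 2 = 0),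
          if_neg (by omega : ¬((w - 2) % 4 = 0 ∨ w - 2 = 0)),
          if_neg (by omega : ¬(s + w - 1) % 4 = 0), if_neg (by omega : ¬(s + w - 1) % 4 = 1),
          if_neg (by omega : ¬(s + w - 1) % 4 = 2),
          if_neg (by omega : ¬(s - 1) % 4 = 0), if_neg (by omega : ¬(s - 1) % 4 = 1),
          if_neg (by omega : ¬(s - 1) % 4 = 2),
          PySem.Int.bxor_zero, PySem.Int.bxor_zero]
    · -- s%4=0, w%4=1: branch Even Even, no flip; RHS: T(L)=L, T(s-1)=0
      rw [if_pos (by omega : s % 2 = 0 ∧ (s + w - 1) % 2 = 0),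
          if_neg (by omega : ¬((w - 1 - 2) % 4 = 0 ∨ w - 1 - 2 = 0)),
          if_pos (by omega : (s + w - 1) % 4 = 0),
          if_neg (by omega : ¬(s - 1) % 4 = 0), if_neg (by omega : ¬(s - 1) % 4 = 1),
          if_neg (by omega : ¬(s - 1) % 4 = 2),
          PySem.Int.bxor_zero]
    · -- s%4=0, w%4=2: branch Even Odd, flip; RHS: T(L)=1, T(s-1)=0
      rw [if_neg (by omega : ¬(s % 2 = 0 ∧ (s + w - 1) % 2 = 0)),
          if_pos (by omega : s % 2 = 0 ∧ ¬(s + w - 1) % 2 = 0),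
          if_pos (by omega : (w - 2) % 4 = 0 ∨ w - 2 = 0),
          if_neg (by omega : ¬(s + w - 1) % 4 = 0), if_pos (by omega : (s + w - 1) % 4 = 1),
          if_neg (by omega : ¬(s - 1) % 4 = 0), if_neg (by omega : ¬(s - 1) % 4 = 1),
          if_neg (by omega : ¬(s - 1) % 4 = 2),
          PySem.Int.bxor_zero]
    · -- s%4=0, w%4=3: branch Even Even, flip; RHS: T(L)=L+1, T(s-1)=0
      rw [if_pos (by omega : s % 2 = 0 ∧ (s + w - 1) % 2 = 0),
          if_pos (by omega : (w - 1 - 2) % 4 = 0 ∨ w - 1 - 2 = 0),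
          if_neg (by omega : ¬(s + w - 1) % 4 = 0), if_neg (by omega : ¬(s + w - 1) % 4 = 1),
          if_pos (by omega : (s + w - 1) % 4 = 2),
          if_neg (by omega : ¬(s - 1) % 4 = 0), if_neg (by omega : ¬(s - 1) % 4 = 1),
          if_neg (by omega : ¬(s - 1) % 4 = 2),
          PySem.Int.bxor_zero, pvBxorAssoc,
          pvBxorOneEven (s + w - 1) (by omega)]
  · rcases (by omega : w % 4 = 0 ∨ w % 4 = 1 ∨ w % 4 = 2 ∨ w % 4 = 3) with hv | hv | hv | hv
    · -- s%4=1, w%4=0: branch Odd Even, flip; RHS: T(L)=L, T(s-1)=s-1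
      rw [if_neg (by omega : ¬(s % 2 = 0 ∧ (s + w - 1) % 2 = 0)),
          if_neg (by omega : ¬(s % 2 = 0 ∧ ¬(s + w - 1) % 2 = 0)),
          if_pos (by omega : ¬s % 2 = 0 ∧ (s + w - 1) % 2 = 0),
          if_pos (by omega : (w - 2 - 2) % 4 = 0 ∨ w - 2 - 2 = 0),
          if_pos (by omega : (s + w - 1) % 4 = 0),
          if_pos (by omega : (s - 1) % 4 = 0),
          ← pvBxorOneOdd s (by omega),
          pvBxorAssoc, pvBxorAssoc, pvBxorLeftComm s (s + w - 1) 1]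
    · -- s%4=1, w%4=1: branch Odd Odd, no flip; RHS: T(L)=1, T(s-1)=s-1
      rw [if_neg (by omega : ¬(s % 2 = 0 ∧ (s + w - 1) % 2 = 0)),
          if_neg (by omega : ¬(s % 2 = 0 ∧ ¬(s + w - 1) % 2 = 0)),
          if_neg (by omega : ¬(¬s % 2 = 0 ∧ (s + w - 1) % 2 = 0)),
          if_neg (by omega : ¬(w - 1 - 2) % 4 = 0),
          if_neg (by omega : ¬(s + w - 1) % 4 = 0), if_pos (by omega : (s + w - 1) % 4 = 1),
          if_pos (by omega : (s - 1) % 4 = 0),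
          PySem.Int.bxor_comm 1 (s - 1), pvBxorOneEven (s - 1) (by omega), es]
    · -- s%4=1, w%4=2: branch Odd Even, no flip; RHS: T(L)=L+1, T(s-1)=s-1
      rw [if_neg (by omega : ¬(s % 2 = 0 ∧ (s + w - 1) % 2 = 0)),
          if_neg (by omega : ¬(s % 2 = 0 ∧ ¬(s + w - 1) % 2 = 0)),
          if_pos (by omega : ¬s % 2 = 0 ∧ (s + w - 1) % 2 = 0),
          if_neg (by omega : ¬((w - 2 - 2) % 4 = 0 ∨ w - 2 - 2 = 0)),
          if_neg (by omega : ¬(s + w - 1) % 4 = 0), if_neg (by omega : ¬(s + w - 1) % 4 = 1),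
          if_pos (by omega : (s + w - 1) % 4 = 2),
          if_pos (by omega : (s - 1) % 4 = 0),
          ← pvBxorOneEven (s + w - 1) (by omega),
          ← pvBxorOneOdd s (by omega),
          pvBxorAssoc (s + w - 1) 1, pvBxorLeftComm 1 s 1, PySem.Int.bxor_self,
          PySem.Int.bxor_zero, pvBxorAssoc, PySem.Int.bxor_comm s (s + w - 1)]
    · -- s%4=1, w%4=3: branch Odd Odd, flip; RHS: T(L)=0, T(s-1)=s-1
      rw [if_neg (by omega : ¬(s % 2 = 0 ∧ (s + w - 1) % 2 = 0)),
          if_neg (by omega : ¬(s % 2 = 0 ∧ ¬(s + w - 1) % 2 = 0)),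
          if_neg (by omega : ¬(¬s % 2 = 0 ∧ (s + w - 1) % 2 = 0)),
          if_pos (by omega : (w - 1 - 2) % 4 = 0),
          if_neg (by omega : ¬(s + w - 1) % 4 = 0), if_neg (by omega : ¬(s + w - 1) % 4 = 1),
          if_neg (by omega : ¬(s + w - 1) % 4 = 2),
          if_pos (by omega : (s - 1) % 4 = 0),
          PySem.Int.bxor_comm 0 (s - 1), PySem.Int.bxor_zero,
          ← pvBxorOneOdd s (by omega), pvBxorAssoc]
  · rcases (by omega : w % 4 = 0 ∨ w % 4 = 1 ∨ w % 4 = 2 ∨ w % 4 = 3) with hv | hv | hv | hv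
    · -- s%4=2, w%4=0: branch Even Odd, no flip; RHS: T(L)=1, T(s-1)=1
      rw [if_neg (by omega : ¬(s % 2 = 0 ∧ (s + w - 1) % 2 = 0)),
          if_pos (by omega : s % 2 = 0 ∧ ¬(s + w - 1) % 2 = 0),
          if_neg (by omega : ¬((w - 2) % 4 = 0 ∨ w - 2 = 0)),
          if_neg (by omega : ¬(s + w - 1) % 4 = 0), if_pos (by omega : (s + w - 1) % 4 = 1),
          if_neg (by omega : ¬(s - 1) % 4 = 0), if_pos (by omega : (s - 1) % 4 = 1),
          PySem.Int.bxor_self, PySem.Int.bxor_zero]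
    · -- s%4=2, w%4=1: branch Even Even, no flip; RHS: T(L)=L+1, T(s-1)=1
      rw [if_pos (by omega : s % 2 = 0 ∧ (s + w - 1) % 2 = 0),
          if_neg (by omega : ¬((w - 1 - 2) % 4 = 0 ∨ w - 1 - 2 = 0)),
          if_neg (by omega : ¬(s + w - 1) % 4 = 0), if_neg (by omega : ¬(s + w - 1) % 4 = 1),
          if_pos (by omega : (s + w - 1) % 4 = 2),
          if_neg (by omega : ¬(s - 1) % 4 = 0), if_pos (by omega : (s - 1) % 4 = 1),
          pvBxorOneOdd (s + w - 1 + 1) (by omega),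
          (by ring : s + w - 1 + 1 - 1 = s + w - 1)]
    · -- s%4=2, w%4=2: branch Even Odd, flip; RHS: T(L)=0, T(s-1)=1
      rw [if_neg (by omega : ¬(s % 2 = 0 ∧ (s + w - 1) % 2 = 0)),
          if_pos (by omega : s % 2 = 0 ∧ ¬(s + w - 1) % 2 = 0),
          if_pos (by omega : (w - 2) % 4 = 0 ∨ w - 2 = 0),
          if_neg (by omega : ¬(s + w - 1) % 4 = 0), if_neg (by omega : ¬(s + w - 1) % 4 = 1),
          if_neg (by omega : ¬(s + w - 1) % 4 = 2),
          if_neg (by omega : ¬(s - 1) % 4 = 0), if_pos (by omega : (s - 1) % 4 = 1),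
          PySem.Int.bxor_comm 0 1, PySem.Int.bxor_zero]
    · -- s%4=2, w%4=3: branch Even Even, flip; RHS: T(L)=L, T(s-1)=1
      rw [if_pos (by omega : s % 2 = 0 ∧ (s + w - 1) % 2 = 0),
          if_pos (by omega : (w - 1 - 2) % 4 = 0 ∨ w - 1 - 2 = 0),
          if_pos (by omega : (s + w - 1) % 4 = 0),
          if_neg (by omega : ¬(s - 1) % 4 = 0), if_pos (by omega : (s - 1) % 4 = 1),
          pvBxorAssoc]
  · rcases (by omega : w % 4 = 0 ∨ w % 4 = 1 ∨ w % 4 = 2 ∨ w % 4 = 3) with hv | hv | hv | hv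
    · -- s%4=3, w%4=0: branch Odd Even, flip; RHS: T(L)=L+1, T(s-1)=(s-1)+1=s
      rw [if_neg (by omega : ¬(s % 2 = 0 ∧ (s + w - 1) % 2 = 0)),
          if_neg (by omega : ¬(s % 2 = 0 ∧ ¬(s + w - 1) % 2 = 0)),
          if_pos (by omega : ¬s % 2 = 0 ∧ (s + w - 1) % 2 = 0),
          if_pos (by omega : (w - 2 - 2) % 4 = 0 ∨ w - 2 - 2 = 0),
          if_neg (by omega : ¬(s + w - 1) % 4 = 0), if_neg (by omega : ¬(s + w - 1) % 4 = 1),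
          if_pos (by omega : (s + w - 1) % 4 = 2),
          if_neg (by omega : ¬(s - 1) % 4 = 0), if_neg (by omega : ¬(s - 1) % 4 = 1),
          if_pos (by omega : (s - 1) % 4 = 2), es,
          ← pvBxorOneEven (s + w - 1) (by omega),
          pvBxorAssoc, pvBxorAssoc,
          PySem.Int.bxor_comm s (PySem.Int.bxor (s + w - 1) 1)]
    · -- s%4=3, w%4=1: branch Odd Odd, no flip; RHS: T(L)=0, T(s-1)=s
      rw [if_neg (by omega : ¬(s % 2 = 0 ∧ (s + w - 1) % 2 = 0)),
          if_neg (by omega : ¬(s % 2 = 0 ∧ ¬(s + w - 1) % 2 = 0)),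
          if_neg (by omega : ¬(¬s % 2 = 0 ∧ (s + w - 1) % 2 = 0)),
          if_neg (by omega : ¬(w - 1 - 2) % 4 = 0),
          if_neg (by omega : ¬(s + w - 1) % 4 = 0), if_neg (by omega : ¬(s + w - 1) % 4 = 1),
          if_neg (by omega : ¬(s + w - 1) % 4 = 2),
          if_neg (by omega : ¬(s - 1) % 4 = 0), if_neg (by omega : ¬(s - 1) % 4 = 1),
          if_pos (by omega : (s - 1) % 4 = 2), es,
          PySem.Int.bxor_comm 0 s, PySem.Int.bxor_zero]
    · -- s%4=3, w%4=2: branch Odd Even, no flip; RHS: T(L)=L, T(s-1)=s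
      rw [if_neg (by omega : ¬(s % 2 = 0 ∧ (s + w - 1) % 2 = 0)),
          if_neg (by omega : ¬(s % 2 = 0 ∧ ¬(s + w - 1) % 2 = 0)),
          if_pos (by omega : ¬s % 2 = 0 ∧ (s + w - 1) % 2 = 0),
          if_neg (by omega : ¬((w - 2 - 2) % 4 = 0 ∨ w - 2 - 2 = 0)),
          if_pos (by omega : (s + w - 1) % 4 = 0),
          if_neg (by omega : ¬(s - 1) % 4 = 0), if_neg (by omega : ¬(s - 1) % 4 = 1),
          if_pos (by omega : (s - 1) % 4 = 2), es,
          pvBxorAssoc, PySem.Int.bxor_comm s (s + w - 1)]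
    · -- s%4=3, w%4=3: branch Odd Odd, flip; RHS: T(L)=1, T(s-1)=s
      rw [if_neg (by omega : ¬(s % 2 = 0 ∧ (s + w - 1) % 2 = 0)),
          if_neg (by omega : ¬(s % 2 = 0 ∧ ¬(s + w - 1) % 2 = 0)),
          if_neg (by omega : ¬(¬s % 2 = 0 ∧ (s + w - 1) % 2 = 0)),
          if_pos (by omega : (w - 1 - 2) % 4 = 0),
          if_neg (by omega : ¬(s + w - 1) % 4 = 0), if_pos (by omega : (s + w - 1) % 4 = 1),
          if_neg (by omega : ¬(s - 1) % 4 = 0), if_neg (by omega : ¬(s - 1) % 4 = 1),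
          if_pos (by omega : (s - 1) % 4 = 2), es,
          PySem.Int.bxor_comm 1 s, pvBxorAssoc]

lemma loop_eq (n : Nat) : ∀ (alt base out k len : Int), 0 ≤ k → k ≤ len → (len - k).toNat = n →
    noLoop alt out (base + k * alt) (len - k) =
      (PySem.List.pyRange k len 1).foldl
        (fun output i =>
          PySem.Int.bxor output
            (PySem.Int.bxor (xorUpto (base + i * alt + (len - i) - 1))
              (xorUpto (base + i * alt - 1)))) out := by
  induction n with
  | zero =>
    intro alt base out k len hk hkl h0
    have hlk : len = k := by omega
    subst hlk
    rw [noLoop, dif_neg (by omega : ¬(0:Int) < len - len),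
        PySem.List.pyRange_one_eq_nil (le_refl len), List.foldl_nil]
  | succ m ih =>
    intro alt base out k len hk hkl h0
    have hlt : k < len := by omega
    rw [PySem.List.pyRange_one_cons hlt, List.foldl_cons,
        noLoop, dif_pos (by omega : (0:Int) < len - k),
        row_eq out (base + k * alt) (len - k) (by omega),
        (by ring : base + k * alt + alt = base + (k + 1) * alt),
        (by ring : len - k - 1 = len - (k + 1))]
    exact ih alt base _ (k + 1) len (by omega) (by omega) (by omega)

-- ===== VERDICT (by name: the statement is the Claim_ definition above) =====
theorem no_spec : Claim_equal_no := by
  unfold Claim_equal_no Spec_no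
  intro start length _
  unfold no no_alt
  by_cases h : 0 < length
  · have hmain := loop_eq length.toNat length start 0 0 length (le_refl 0) (by omega) (by omega)
    simp only [zero_mul, add_zero, sub_zero] at hmain
    exact hmain
  · rw [noLoop, dif_neg h, PySem.List.pyRange_one_eq_nil (by omega : length ≤ (0:Int)),
        List.foldl_nil]
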